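-- pv_equiv track=rewrite | github.com/cleitonricardo/BOT_Python | from selenium import webdriver2.py | juntar_pares
-- ===== SOURCE A (Python) =====
-- def juntar_pares(lista):
--     pares = []
--     for i in range(0, len(lista), 2):
--         if i + 1 < len(lista):
--             pares.append(f"{lista[i]} {lista[i+1]}")
--         else:
--             pares.append(lista[i])
--     return ', '.join(pares)
-- ===== SOURCE B (Python) =====
-- def juntar_pares(lista):
--     pares = [f"{a} {b}" for a, b in zip(lista[0::2], lista[1::2])]
--     if len(lista) % 2:
--         pares.append(lista[-1])
--     return ', '.join(pares)
-- ===== Notes on version B (the rewrite author's own statement) =====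
-- stated objective: idiomatic
-- what changed: Replaces the index-stepping loop with its per-iteration i+1 bounds check by zipping the two stride-2 slices and handling the odd tail with a single parity check at the end.
import Mathlib
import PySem

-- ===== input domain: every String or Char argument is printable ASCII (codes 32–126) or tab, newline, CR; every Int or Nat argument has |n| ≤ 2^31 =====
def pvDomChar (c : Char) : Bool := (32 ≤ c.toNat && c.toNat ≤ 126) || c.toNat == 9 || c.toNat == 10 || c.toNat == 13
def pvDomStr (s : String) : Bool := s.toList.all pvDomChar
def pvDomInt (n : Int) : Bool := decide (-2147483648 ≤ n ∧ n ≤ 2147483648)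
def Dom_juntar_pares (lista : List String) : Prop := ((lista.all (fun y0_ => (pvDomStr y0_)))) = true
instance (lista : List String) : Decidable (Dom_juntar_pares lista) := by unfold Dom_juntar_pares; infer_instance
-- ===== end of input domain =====

-- B replaces A's index-stepping loop (with its per-iteration i+1 bounds check) by zipping the two stride-2
-- slices and one parity check for the odd tail; same O(n) cost, more idiomatic.

-- ===== PORT A =====
-- f"{lista[i]} {lista[i+1]}" is the two strings joined by one space; both indices are in range, so pyGetD's
-- default "" is never used.
def juntar_pares (lista : List String) : String :=
  let pares : List String :=
    (PySem.List.pyRange 0 (PySem.List.len lista) 2).foldl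
      (fun pares i =>
        if i + 1 < PySem.List.len lista then
          pares ++ [PySem.Str.join " " [PySem.List.pyGetD lista i "", PySem.List.pyGetD lista (i + 1) ""]]
        else
          pares ++ [PySem.List.pyGetD lista i ""])
      []
  PySem.Str.join ", " pares

-- ===== PORT B =====
-- lista[0::2] / lista[1::2] are slice? with step 2 (step ≠ 0, so never none); lista[-1] is only read when
-- the length is odd, hence in range and pyGet?'s default "" is never used.
def juntar_pares_alt (lista : List String) : String :=
  let evens : List String := (PySem.List.slice? lista (some 0) none 2).getD []
  let odds : List String := (PySem.List.slice? lista (some 1) none 2).getD []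
  let pares : List String := (evens.zip odds).map (fun ab => PySem.Str.join " " [ab.1, ab.2])
  let pares : List String :=
    if PySem.Int.mod (PySem.List.len lista) 2 ≠ 0 then
      pares ++ [(PySem.List.pyGet? lista (-1)).getD ""]
    else pares
  PySem.Str.join ", " pares

-- ===== PRECONDITION & SPEC =====
def Spec_juntar_pares (lista : List String) (out : String) : Prop := out = juntar_pares_alt lista
instance (lista : List String) (out : String) : Decidable (Spec_juntar_pares lista out) := by unfold Spec_juntar_pares; infer_instance

-- ===== CLAIM (what is proved, stated in full; the proofs are below) =====
def Claim_equal_juntar_pares : Prop := ∀ (lista : List String), Dom_juntar_pares lista → Spec_juntar_pares lista (juntar_pares lista)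

-- ===== LEMMAS AND PROOFS =====

-- A's pares list in closed form: one entry per k < ⌈n/2⌉, pairing positions 2k and 2k+1.
lemma juntar_pares_eq_norm (lista : List String) :
    juntar_pares lista = PySem.Str.join ", "
      ((List.range ((lista.length + 1) / 2)).map (fun k =>
        if 2 * k + 1 < lista.length then
          PySem.Str.join " " [lista.getD (2 * k) "", lista.getD (2 * k + 1) ""]
        else lista.getD (2 * k) "")) := by
  unfold juntar_pares
  have hbody : (fun (acc : List String) (i : Int) =>
      if i + 1 < PySem.List.len lista then
        acc ++ [PySem.Str.join " " [PySem.List.pyGetD lista i "", PySem.List.pyGetD lista (i + 1) ""]]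
      else acc ++ [PySem.List.pyGetD lista i ""]) =
      (fun (acc : List String) (i : Int) => acc ++
        [if i + 1 < PySem.List.len lista then
          PySem.Str.join " " [PySem.List.pyGetD lista i "", PySem.List.pyGetD lista (i + 1) ""]
        else PySem.List.pyGetD lista i ""]) := by
    funext acc i; split_ifs <;> rfl
  rw [hbody, PySem.List.foldl_append_singleton_eq_map, List.nil_append]
  rw [PySem.List.pyRange_of_pos 0 (PySem.List.len lista) (by norm_num)]
  have hlen : PySem.List.len lista = (lista.length : Int) := by simp [PySem.List.len]
  have hcount : (if (0 : Int) < PySem.List.len lista then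
      (((PySem.List.len lista) - 0 + 2 - 1) / 2).toNat else 0) = (lista.length + 1) / 2 := by
    rw [hlen]; split_ifs with h <;> omega
  rw [hcount, List.map_map]
  refine congrArg (PySem.Str.join ", ") (List.map_congr_left ?_)
  intro k _
  have e1 : (0 : Int) + 2 * (k : Int) = ((2 * k : Nat) : Int) := by push_cast; ring
  have e2 : ((2 * k : Nat) : Int) + 1 = ((2 * k + 1 : Nat) : Int) := by push_cast; ring
  simp only [Function.comp, e1, e2, PySem.List.pyGetD_natCast]
  by_cases h : 2 * k + 1 < lista.length
  · rw [if_pos (by rw [hlen]; exact_mod_cast h), if_pos h]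
  · rw [if_neg (by rw [hlen]; exact (fun hc => h (by exact_mod_cast hc))), if_neg h]

-- lista[0::2] in closed form.
lemma evens_eq (lista : List String) :
    (PySem.List.slice? lista (some 0) none 2).getD [] =
      (List.range ((lista.length + 1) / 2)).map (fun k => lista.getD (2 * k) "") := by
  have hidx : PySem.List.sliceIndices lista.length (some 0) none 2 = (0, (lista.length : Int), 2) := by
    simp [PySem.List.sliceIndices]
  simp only [PySem.List.slice?, hidx]
  norm_num
  have hcount : (if 0 < lista.length then (((lista.length : Int) + 2 - 1) / 2).toNat else 0) =
      (lista.length + 1) / 2 := by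
    split_ifs with h <;> omega
  rw [hcount]
  rw [List.filterMap_eq_map_iff_forall_eq_some.mpr ?_]
  intro k hk
  rw [List.mem_range] at hk
  have e : (2 * (k : Int)).toNat = 2 * k := by omega
  rw [e, List.getElem?_eq_getElem (show 2 * k < lista.length by omega)]
  simp

-- lista[1::2] in closed form.
lemma odds_eq (lista : List String) :
    (PySem.List.slice? lista (some 1) none 2).getD [] =
      (List.range (lista.length / 2)).map (fun k => lista.getD (2 * k + 1) "") := by
  have hidx : PySem.List.sliceIndices lista.length (some 1) none 2 =
      (min 1 (lista.length : Int), (lista.length : Int), 2) := by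
    simp [PySem.List.sliceIndices]
  simp only [PySem.List.slice?, hidx]
  norm_num
  have hcount : (if 1 < lista.length then
      (((lista.length : Int) - min 1 (lista.length : Int) + 2 - 1) / 2).toNat else 0) =
      lista.length / 2 := by
    split_ifs with h <;> omega
  rw [hcount]
  rw [List.filterMap_eq_map_iff_forall_eq_some.mpr ?_]
  intro k hk
  rw [List.mem_range] at hk
  have hmin : min 1 ((lista.length : Int)) = 1 := by omega
  rw [hmin]
  have e : ((1 : Int) + 2 * (k : Int)).toNat = 2 * k + 1 := by omega
  rw [e, List.getElem?_eq_getElem (show 2 * k + 1 < lista.length by omega)]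
  simp

lemma zip_map_range {α β : Type} (f : Nat → α) (g : Nat → β) (a b : Nat) :
    ((List.range a).map f).zip ((List.range b).map g) =
      (List.range (min a b)).map (fun k => (f k, g k)) := by
  apply List.ext_getElem
  · simp
  · intro i h1 h2
    simp

lemma pyGet_neg_one (lista : List String) (h : lista ≠ []) :
    (PySem.List.pyGet? lista (-1)).getD "" = lista.getD (lista.length - 1) "" := by
  have hn : 1 ≤ lista.length := by
    cases lista with
    | nil => exact absurd rfl h
    | cons x r => simp
  have hidx : PySem.List.pyIdx? lista.length (-1) = some (lista.length - 1) := by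
    simp only [PySem.List.pyIdx?]
    rw [if_neg (by omega), if_pos (by omega)]
    norm_num
  simp [PySem.List.pyGet?, hidx, List.getD]

-- B's pares list in closed form.
lemma juntar_pares_alt_eq_norm (lista : List String) :
    juntar_pares_alt lista = PySem.Str.join ", "
      ((List.range (lista.length / 2)).map (fun k =>
          PySem.Str.join " " [lista.getD (2 * k) "", lista.getD (2 * k + 1) ""]) ++
        (if lista.length % 2 = 1 then [lista.getD (lista.length - 1) ""] else [])) := by
  unfold juntar_pares_alt
  simp only [evens_eq, odds_eq, zip_map_range, List.map_map]
  have hlen : PySem.List.len lista = (lista.length : Int) := by simp [PySem.List.len]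
  have hmin : min ((lista.length + 1) / 2) (lista.length / 2) = lista.length / 2 := by omega
  rw [hmin]
  have hmod : PySem.Int.mod (PySem.List.len lista) 2 = ((lista.length % 2 : Nat) : Int) := by
    rw [hlen]
    exact_mod_cast PySem.Int.mod_natCast lista.length 2
  by_cases hpar : lista.length % 2 = 1
  · rw [if_pos (by rw [hmod, hpar]; norm_num), if_pos hpar]
    rw [pyGet_neg_one lista (by intro he; rw [he] at hpar; simp at hpar)]
    rfl
  · rw [if_neg (by rw [hmod]; omega), if_neg hpar, List.append_nil]
    rfl

-- ===== VERDICT (by name: the statement is the Claim_ definition above) =====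
theorem juntar_pares_spec : Claim_equal_juntar_pares := by
  intro lista _
  unfold Spec_juntar_pares
  rw [juntar_pares_eq_norm, juntar_pares_alt_eq_norm]
  refine congrArg (PySem.Str.join ", ") ?_
  by_cases hpar : lista.length % 2 = 1
  · rw [if_pos hpar]
    have hc : (lista.length + 1) / 2 = lista.length / 2 + 1 := by omega
    rw [hc, List.range_succ, List.map_append]
    congr 1
    · refine List.map_congr_left ?_
      intro k hk
      rw [List.mem_range] at hk
      rw [if_pos (by omega)]
    · rw [List.map_singleton, if_neg (by omega),
        show 2 * (lista.length / 2) = lista.length - 1 by omega]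
  · rw [if_neg hpar, List.append_nil]
    have hc : (lista.length + 1) / 2 = lista.length / 2 := by omega
    rw [hc]
    refine List.map_congr_left ?_
    intro k hk
    rw [List.mem_range] at hk
    rw [if_pos (by omega)]
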